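-- pv_equiv track=rewrite | github.com/rhasepy/Metaheuristic-Works | MinimumSpanningTree-Metaheuristic/VariableNeighboor_sort.py | returnMinimizedNeighboor
-- ===== SOURCE A (Python) =====
-- def arrayCost(arr):
--
--     count = 0
--     for i in range(len(arr)):
--         for j in range(len(arr)):
--             if((i < j) & (arr[j] < arr[i])):
--                 count += 1
--             elif((i > j) & (arr[i] < arr[j])):
--                 count += 1
--
--     return count
--
-- def returnMinimizedNeighboor(arr):
--
--     cost = arrayCost(arr)
--     nbArr = []
--
--     for i in range(len(arr)):
--         for j in  range(i+1, len(arr)):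
--             arr[i], arr[j] = arr[j], arr[i]
--
--             tempCost = arrayCost(arr)
--             if (cost > tempCost):
--                 cost = tempCost
--                 nbArr.clear()
--                 for idx in range(0, len(arr)):
--                     nbArr.append(arr[idx])
--
--             arr[i], arr[j] = arr[j], arr[i]
--
--     return nbArr
-- ===== SOURCE B (Python) =====
-- # Faster re-implementation: instead of recomputing the full O(n^2) inversion cost
-- # for every candidate swap (O(n^4) total), compute each swap's cost delta
-- # incrementally in O(j-i), keep the first pair achieving the minimum (negative)
-- # delta, and apply that single swap at the end.  (Return value only; A's
-- # temporary in-place swaps always restore arr, so observable behaviour matches.)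
-- def returnMinimizedNeighboor(arr):
--     n = len(arr)
--     best_d = 0
--     best = None
--     for i in range(n):
--         a = arr[i]
--         for j in range(i + 1, n):
--             b = arr[j]
--             d = (1 if a < b else 0) - (1 if b < a else 0)
--             for k in range(i + 1, j):
--                 c = arr[k]
--                 d += ((1 if c < b else 0) - (1 if c < a else 0)
--                       + (1 if a < c else 0) - (1 if b < c else 0))
--             if d < best_d:
--                 best_d = d
--                 best = (i, j)
--     if best is None:
--         return []
--     i, j = best
--     out = list(arr)
--     out[i], out[j] = out[j], out[i]
--     return out
-- ===== Notes on version B (the rewrite author's own statement) =====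
-- stated objective: faster
-- what changed: Instead of rebuilding the whole array cost with a full O(n^2) double loop for every candidate swap, B computes each swap's inversion-cost delta in a single O(j-i) pass over the elements between the swapped positions, tracks only the best (first strictly-improving) pair, and applies that one swap at the end.
import Mathlib
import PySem

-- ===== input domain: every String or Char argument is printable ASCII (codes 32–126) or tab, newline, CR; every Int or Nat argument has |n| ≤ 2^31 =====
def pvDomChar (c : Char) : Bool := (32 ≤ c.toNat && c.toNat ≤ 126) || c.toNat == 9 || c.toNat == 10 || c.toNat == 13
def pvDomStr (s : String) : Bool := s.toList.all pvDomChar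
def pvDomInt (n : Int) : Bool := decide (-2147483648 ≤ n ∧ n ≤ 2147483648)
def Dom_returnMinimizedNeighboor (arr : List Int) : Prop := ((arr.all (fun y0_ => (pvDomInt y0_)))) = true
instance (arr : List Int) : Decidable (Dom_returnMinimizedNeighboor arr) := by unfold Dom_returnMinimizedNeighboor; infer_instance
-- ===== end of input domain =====

-- B computes each candidate swap's inversion-cost change incrementally (one O(n) pass per
-- pair) instead of recomputing the full quadratic cost per pair, then applies the single
-- best swap at the end; return value only — A's temporary in-place swaps always restore arr.

-- ===== PORT A =====
def arrayCost (arr : List Int) : Int :=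
  (PySem.List.pyRange 0 (PySem.List.len arr)).foldl (fun count i =>
    (PySem.List.pyRange 0 (PySem.List.len arr)).foldl (fun count j =>
      if i < j ∧ PySem.List.pyGetD arr j 0 < PySem.List.pyGetD arr i 0 then count + 1
      else if j < i ∧ PySem.List.pyGetD arr i 0 < PySem.List.pyGetD arr j 0 then count + 1
      else count) count) 0

def returnMinimizedNeighboor (arr : List Int) : List Int :=
  let st : Int × List Int × List Int :=
    (PySem.List.pyRange 0 (PySem.List.len arr)).foldl (fun st i =>
      (PySem.List.pyRange (i + 1) (PySem.List.len arr)).foldl (fun st j =>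
        let cost := st.1; let nbArr := st.2.1; let a := st.2.2
        let a1 := PySem.List.pySetD (PySem.List.pySetD a i (PySem.List.pyGetD a j 0)) j
                    (PySem.List.pyGetD a i 0)
        let tempCost := arrayCost a1
        let st2 : Int × List Int :=
          if cost > tempCost then
            (tempCost,
             (PySem.List.pyRange 0 (PySem.List.len a1)).foldl
               (fun nb idx => nb ++ [PySem.List.pyGetD a1 idx 0]) [])
          else (cost, nbArr)
        let a2 := PySem.List.pySetD (PySem.List.pySetD a1 i (PySem.List.pyGetD a1 j 0)) j
                    (PySem.List.pyGetD a1 i 0)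
        (st2.1, st2.2, a2)) st) (arrayCost arr, [], arr)
  st.2.1

-- ===== PORT B =====
def returnMinimizedNeighboor_alt (arr : List Int) : List Int :=
  let st : Int × Option (Int × Int) :=
    (PySem.List.pyRange 0 (PySem.List.len arr)).foldl (fun st i =>
      let a := PySem.List.pyGetD arr i 0
      (PySem.List.pyRange (i + 1) (PySem.List.len arr)).foldl (fun st j =>
        let b := PySem.List.pyGetD arr j 0
        let d0 := (if a < b then (1 : Int) else 0) - (if b < a then 1 else 0)
        let d := (PySem.List.pyRange (i + 1) j).foldl (fun d k =>
          let c := PySem.List.pyGetD arr k 0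
          d + ((if c < b then (1 : Int) else 0) - (if c < a then 1 else 0)
               + (if a < c then 1 else 0) - (if b < c then 1 else 0))) d0
        if d < st.1 then (d, some (i, j)) else st) st) (0, none)
  match st.2 with
  | none => []
  | some (i, j) =>
      PySem.List.pySetD (PySem.List.pySetD arr i (PySem.List.pyGetD arr j 0)) j
        (PySem.List.pyGetD arr i 0)

-- ===== PRECONDITION & SPEC =====
def Spec_returnMinimizedNeighboor (arr : List Int) (out : List Int) : Prop := out = returnMinimizedNeighboor_alt arr
instance (arr : List Int) (out : List Int) : Decidable (Spec_returnMinimizedNeighboor arr out) := by unfold Spec_returnMinimizedNeighboor; infer_instance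

-- ===== CLAIM (what is proved, stated in full; the proofs are below) =====
def Claim_equal_returnMinimizedNeighboor : Prop := ∀ (arr : List Int), Dom_returnMinimizedNeighboor arr → Spec_returnMinimizedNeighboor arr (returnMinimizedNeighboor arr)

-- ===== LEMMAS AND PROOFS =====

def pvCnt (x y : Int) : Int := if x < y then 1 else 0

def pvInv (l : List Int) : Int :=
  ∑ q ∈ Finset.range l.length, ∑ p ∈ Finset.range q, pvCnt (l.getD q 0) (l.getD p 0)

theorem pv_sum_map_range (f : Nat → Int) (n : Nat) :
    ((List.range n).map f).sum = ∑ k ∈ Finset.range n, f k := by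
  induction n with
  | zero => simp
  | succ m ih => simp [List.range_succ, Finset.sum_range_succ, ih]

theorem pv_foldl2_sum (R1 R2 : List Int) (g : Int → Int → Int) (c0 : Int) :
    R1.foldl (fun c i => R2.foldl (fun c j => c + g i j) c) c0
      = c0 + (R1.map (fun i => (R2.map (g i)).sum)).sum := by
  induction R1 generalizing c0 with
  | nil => simp
  | cons x xs ih =>
      simp only [List.foldl_cons, List.map_cons, List.sum_cons, PySem.List.foldl_add]
      ring

theorem pv_double_map_sum (g : Int → Int → Int) (n : Nat) :
    ((List.map (fun (k : Nat) => (k : Int)) (List.range n)).map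
      (fun i => (List.map (g i) (List.map (fun (k : Nat) => (k : Int)) (List.range n))).sum)).sum
    = ∑ i ∈ Finset.range n, ∑ j ∈ Finset.range n, g (i : Int) (j : Int) := by
  rw [List.map_map, pv_sum_map_range]
  refine Finset.sum_congr rfl (fun k _ => ?_)
  simp only [Function.comp_apply, List.map_map]
  rw [pv_sum_map_range]
  exact Finset.sum_congr rfl (fun j _ => rfl)

theorem pv_sum_trunc (n q : Nat) (hq : q ≤ n) (f : Nat → Int) :
    ∑ p ∈ Finset.range n, (if p < q then f p else 0) = ∑ p ∈ Finset.range q, f p := by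
  rw [← Finset.sum_subset
      (show Finset.range q ⊆ Finset.range n from fun x hx =>
        Finset.mem_range.mpr (lt_of_lt_of_le (Finset.mem_range.mp hx) hq))
      (fun x _ hnx => if_neg (fun h => hnx (Finset.mem_range.mpr h)))]
  exact Finset.sum_congr rfl (fun p hp => if_pos (Finset.mem_range.mp hp))

theorem pv_arrayCost_eq (l : List Int) : arrayCost l = 2 * pvInv l := by
  have hb : (fun (count : Int) (i : Int) =>
      (PySem.List.pyRange 0 (PySem.List.len l)).foldl (fun count j =>
        if i < j ∧ PySem.List.pyGetD l j 0 < PySem.List.pyGetD l i 0 then count + 1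
        else if j < i ∧ PySem.List.pyGetD l i 0 < PySem.List.pyGetD l j 0 then count + 1
        else count) count)
      = (fun (count : Int) (i : Int) =>
      (PySem.List.pyRange 0 (PySem.List.len l)).foldl (fun c j => c +
        (if i < j ∧ PySem.List.pyGetD l j 0 < PySem.List.pyGetD l i 0 then 1
         else if j < i ∧ PySem.List.pyGetD l i 0 < PySem.List.pyGetD l j 0 then 1
         else 0)) count) := by
    funext c i
    congr 1
    funext c j
    split_ifs <;> ring
  have hlen : PySem.List.len l = (l.length : Int) := by
    simp [PySem.List.len]
  unfold arrayCost
  rw [hb, pv_foldl2_sum, hlen, PySem.List.pyRange_zero_nat, pv_double_map_sum, zero_add]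
  have e1 : (∑ i ∈ Finset.range l.length, ∑ j ∈ Finset.range l.length,
        (if (i : Int) < (j : Int) ∧ PySem.List.pyGetD l (j : Int) 0 < PySem.List.pyGetD l (i : Int) 0 then (1:Int)
         else if (j : Int) < (i : Int) ∧ PySem.List.pyGetD l (i : Int) 0 < PySem.List.pyGetD l (j : Int) 0 then 1
         else 0))
      = ∑ i ∈ Finset.range l.length, ∑ j ∈ Finset.range l.length,
        ((if i < j then pvCnt (l.getD j 0) (l.getD i 0) else 0)
         + (if j < i then pvCnt (l.getD i 0) (l.getD j 0) else 0)) := by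
    refine Finset.sum_congr rfl (fun i _ => Finset.sum_congr rfl (fun j _ => ?_))
    simp only [PySem.List.pyGetD_natCast, Nat.cast_lt, pvCnt]
    split_ifs <;> omega
  rw [e1]
  simp only [Finset.sum_add_distrib]
  have h1 : ∑ i ∈ Finset.range l.length, ∑ j ∈ Finset.range l.length,
      (if i < j then pvCnt (l.getD j 0) (l.getD i 0) else 0) = pvInv l := by
    rw [Finset.sum_comm]
    exact Finset.sum_congr rfl (fun q hq =>
      pv_sum_trunc _ _ (le_of_lt (Finset.mem_range.mp hq)) _)
  have h2 : ∑ i ∈ Finset.range l.length, ∑ j ∈ Finset.range l.length,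
      (if j < i then pvCnt (l.getD i 0) (l.getD j 0) else 0) = pvInv l := by
    exact Finset.sum_congr rfl (fun q hq =>
      pv_sum_trunc _ _ (le_of_lt (Finset.mem_range.mp hq)) _)
  rw [h1, h2]
  ring

def pvE (a b c : Int) : Int := pvCnt c b - pvCnt c a + (pvCnt a c - pvCnt b c)

def pvDelta (l : List Int) (i j : Nat) : Int :=
  (pvCnt (l.getD i 0) (l.getD j 0) - pvCnt (l.getD j 0) (l.getD i 0))
  + ∑ k ∈ Finset.Ico (i + 1) j, pvE (l.getD i 0) (l.getD j 0) (l.getD k 0)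

def pvSwap (l : List Int) (i j : Int) : List Int :=
  PySem.List.pySetD (PySem.List.pySetD l i (PySem.List.pyGetD l j 0)) j (PySem.List.pyGetD l i 0)

theorem pv_length_swap (l : List Int) (i j : Int) : (pvSwap l i j).length = l.length := by
  simp [pvSwap, PySem.List.length_pySetD]

theorem pv_swap_natCast (l : List Int) (i j : Nat) :
    pvSwap l (i : Int) (j : Int) = (l.set i (l.getD j 0)).set j (l.getD i 0) := by
  simp [pvSwap]

theorem pv_getD_swap (l : List Int) (i j : Nat) (hij : i < j) (hj : j < l.length) (k : Nat) :
    (pvSwap l (i : Int) (j : Int)).getD k 0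
      = if k = j then l.getD i 0 else if k = i then l.getD j 0 else l.getD k 0 := by
  have hi : i < l.length := lt_trans hij hj
  rw [pv_swap_natCast]
  simp only [List.getD_eq_getElem?_getD, List.getElem?_set, List.length_set]
  by_cases hkj : k = j
  · rw [if_pos hkj.symm, if_pos (by omega : j < l.length), if_pos hkj, Option.getD_some]
  · rw [if_neg (fun h => hkj h.symm), if_neg hkj]
    by_cases hki : k = i
    · rw [if_pos hki.symm, if_pos (by omega : i < l.length), if_pos hki, Option.getD_some]
    · rw [if_neg (fun h => hki h.symm), if_neg hki]

theorem pv_swap_swap (l : List Int) (i j : Nat) (hij : i < j) (hj : j < l.length) :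
    pvSwap (pvSwap l (i : Int) (j : Int)) (i : Int) (j : Int) = l := by
  have hi : i < l.length := lt_trans hij hj
  have hlen : (pvSwap (pvSwap l (i:Int) (j:Int)) (i:Int) (j:Int)).length = l.length := by
    rw [pv_length_swap, pv_length_swap]
  apply List.ext_getElem hlen
  intro k h1 h2
  have hk : k < l.length := h2
  have g1 := pv_getD_swap l i j hij hj
  have g2 := pv_getD_swap (pvSwap l (i:Int) (j:Int)) i j hij (by rw [pv_length_swap]; exact hj)
  have hgi : (pvSwap l (i:Int) (j:Int)).getD i 0 = l.getD j 0 := by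
    rw [g1 i, if_neg (by omega), if_pos rfl]
  have hgj : (pvSwap l (i:Int) (j:Int)).getD j 0 = l.getD i 0 := by
    rw [g1 j, if_pos rfl]
  have e1 : (pvSwap (pvSwap l (i:Int) (j:Int)) (i:Int) (j:Int)).getD k 0 = l.getD k 0 := by
    rw [g2 k]
    by_cases hkj : k = j
    · rw [if_pos hkj, hgi, hkj]
    · rw [if_neg hkj]
      by_cases hki : k = i
      · rw [if_pos hki, hgj, hki]
      · rw [if_neg hki, g1 k, if_neg hkj, if_neg hki]
  calc (pvSwap (pvSwap l (i:Int) (j:Int)) (i:Int) (j:Int))[k]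
        = (pvSwap (pvSwap l (i:Int) (j:Int)) (i:Int) (j:Int)).getD k 0 := by
          rw [List.getD_eq_getElem _ _ h1]
    _ = l.getD k 0 := e1
    _ = l[k] := List.getD_eq_getElem _ _ hk

theorem pv_inv_swap (l : List Int) (i j : Nat) (hij : i < j) (hj : j < l.length) :
    pvInv (pvSwap l (i : Int) (j : Int)) = pvInv l + pvDelta l i j := by
  have hi : i < l.length := lt_trans hij hj
  have hch := pv_getD_swap l i j hij hj
  have hlen : (pvSwap l (i:Int) (j:Int)).length = l.length := pv_length_swap l _ _
  have hia : l.getD i 0 = l.getD i 0 := rfl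
  -- abbreviations
  set a := l.getD i 0 with ha
  set b := l.getD j 0 with hb
  set l' := pvSwap l (i:Int) (j:Int) with hl'
  set n := l.length with hn
  -- row difference
  set Row : Nat → Int := fun q => ∑ p ∈ Finset.range q,
      (pvCnt (l'.getD q 0) (l'.getD p 0) - pvCnt (l.getD q 0) (l.getD p 0)) with hRow
  have hrow_lo : ∀ q, q < i → Row q = 0 := by
    intro q hq
    refine Finset.sum_eq_zero (fun p hp => ?_)
    have hpq := Finset.mem_range.mp hp
    rw [hch q, hch p]
    rw [if_neg (by omega), if_neg (by omega), if_neg (by omega), if_neg (by omega)]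
    ring
  have hrow_i : Row i = ∑ p ∈ Finset.range i, (pvCnt b (l.getD p 0) - pvCnt a (l.getD p 0)) := by
    refine Finset.sum_congr rfl (fun p hp => ?_)
    have hpq := Finset.mem_range.mp hp
    rw [hch i, hch p]
    rw [if_neg (by omega), if_pos rfl, if_neg (by omega), if_neg (by omega)]
  have hrow_mid : ∀ q, i < q → q < j →
      Row q = pvCnt (l.getD q 0) b - pvCnt (l.getD q 0) a := by
    intro q hiq hqj
    have : Row q = ∑ p ∈ Finset.range q,
        (if p = i then pvCnt (l.getD q 0) b - pvCnt (l.getD q 0) a else 0) := by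
      refine Finset.sum_congr rfl (fun p hp => ?_)
      have hpq := Finset.mem_range.mp hp
      rw [hch q, hch p, if_neg (by omega), if_neg (by omega)]
      by_cases hpi : p = i
      · rw [if_pos hpi, if_neg (by omega), if_pos hpi, hpi]
      · rw [if_neg (by omega), if_neg hpi, if_neg hpi]
        ring
    rw [this, Finset.sum_ite_eq' (Finset.range q) i
      (fun _ => pvCnt (l.getD q 0) b - pvCnt (l.getD q 0) a),
      if_pos (Finset.mem_range.mpr hiq)]
  have hrow_j : Row j = (∑ p ∈ Finset.range i, (pvCnt a (l.getD p 0) - pvCnt b (l.getD p 0)))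
      + (pvCnt a b - pvCnt b a)
      + ∑ p ∈ Finset.Ico (i+1) j, (pvCnt a (l.getD p 0) - pvCnt b (l.getD p 0)) := by
    have e : Row j = ∑ p ∈ Finset.range j,
        (if p = i then pvCnt a b - pvCnt b a else pvCnt a (l.getD p 0) - pvCnt b (l.getD p 0)) := by
      refine Finset.sum_congr rfl (fun p hp => ?_)
      have hpq := Finset.mem_range.mp hp
      rw [hch j, hch p, if_pos rfl]
      by_cases hpi : p = i
      · rw [if_neg (by omega), if_pos hpi, if_pos hpi, hpi]
      · rw [if_neg (by omega), if_neg hpi, if_neg hpi]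
    rw [e, Finset.range_eq_Ico,
      ← Finset.sum_Ico_consecutive _ (Nat.zero_le (i+1)) (by omega : i+1 ≤ j),
      ← Finset.sum_Ico_consecutive _ (Nat.zero_le i) (by omega : i ≤ i+1)]
    have s1 : ∑ p ∈ Finset.Ico 0 i,
        (if p = i then pvCnt a b - pvCnt b a else pvCnt a (l.getD p 0) - pvCnt b (l.getD p 0))
        = ∑ p ∈ Finset.range i, (pvCnt a (l.getD p 0) - pvCnt b (l.getD p 0)) := by
      rw [← Finset.range_eq_Ico]
      exact Finset.sum_congr rfl (fun p hp =>
        if_neg (by have := Finset.mem_range.mp hp; omega))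
    have s2 : ∑ p ∈ Finset.Ico i (i+1),
        (if p = i then pvCnt a b - pvCnt b a else pvCnt a (l.getD p 0) - pvCnt b (l.getD p 0))
        = pvCnt a b - pvCnt b a := by
      rw [Nat.Ico_succ_singleton, Finset.sum_singleton, if_pos rfl]
    have s3 : ∑ p ∈ Finset.Ico (i+1) j,
        (if p = i then pvCnt a b - pvCnt b a else pvCnt a (l.getD p 0) - pvCnt b (l.getD p 0))
        = ∑ p ∈ Finset.Ico (i+1) j, (pvCnt a (l.getD p 0) - pvCnt b (l.getD p 0)) := by
      exact Finset.sum_congr rfl (fun p hp =>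
        if_neg (by have := Finset.mem_Ico.mp hp; omega))
    rw [s1, s2, s3]
    rw [Nat.Ico_zero_eq_range]
  have hrow_hi : ∀ q, j < q → Row q = 0 := by
    intro q hq
    have e : Row q = ∑ p ∈ Finset.range q,
        ((if p = i then pvCnt (l.getD q 0) b - pvCnt (l.getD q 0) a else 0)
         + (if p = j then pvCnt (l.getD q 0) a - pvCnt (l.getD q 0) b else 0)) := by
      refine Finset.sum_congr rfl (fun p hp => ?_)
      have hpq := Finset.mem_range.mp hp
      rw [hch q, hch p, if_neg (by omega), if_neg (by omega)]
      by_cases hpj : p = j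
      · rw [if_pos hpj, if_neg (by omega), if_pos hpj, hpj]
        ring
      · by_cases hpi : p = i
        · rw [if_neg hpj, if_pos hpi, if_pos hpi, if_neg hpj, hpi]
          ring
        · rw [if_neg hpj, if_neg hpi, if_neg hpi, if_neg hpj]
          ring
    rw [e, Finset.sum_add_distrib,
      Finset.sum_ite_eq' (Finset.range q) i _, Finset.sum_ite_eq' (Finset.range q) j _,
      if_pos (Finset.mem_range.mpr (by omega)), if_pos (Finset.mem_range.mpr (by omega))]
    ring
  -- assemble
  have key : ∑ q ∈ Finset.range n, Row q = pvDelta l i j := by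
    rw [Finset.range_eq_Ico,
      ← Finset.sum_Ico_consecutive _ (Nat.zero_le (j+1)) (by omega : j+1 ≤ n),
      ← Finset.sum_Ico_consecutive _ (Nat.zero_le j) (by omega : j ≤ j+1),
      ← Finset.sum_Ico_consecutive _ (Nat.zero_le (i+1)) (by omega : i+1 ≤ j),
      ← Finset.sum_Ico_consecutive _ (Nat.zero_le i) (by omega : i ≤ i+1)]
    have c1 : ∑ q ∈ Finset.Ico 0 i, Row q = 0 :=
      Finset.sum_eq_zero (fun q hq => hrow_lo q (Finset.mem_Ico.mp hq).2)
    have c2 : ∑ q ∈ Finset.Ico i (i+1), Row q = Row i := by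
      rw [Nat.Ico_succ_singleton, Finset.sum_singleton]
    have c3 : ∑ q ∈ Finset.Ico (i+1) j, Row q
        = ∑ q ∈ Finset.Ico (i+1) j, (pvCnt (l.getD q 0) b - pvCnt (l.getD q 0) a) := by
      exact Finset.sum_congr rfl (fun q hq => by
        have := Finset.mem_Ico.mp hq
        exact hrow_mid q (by omega) (by omega))
    have c4 : ∑ q ∈ Finset.Ico j (j+1), Row q = Row j := by
      rw [Nat.Ico_succ_singleton, Finset.sum_singleton]
    have c5 : ∑ q ∈ Finset.Ico (j+1) n, Row q = 0 :=
      Finset.sum_eq_zero (fun q hq => hrow_hi q (Finset.mem_Ico.mp hq).1)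
    rw [c1, c2, c3, c4, c5, hrow_i, hrow_j]
    have cancel : (∑ p ∈ Finset.range i, (pvCnt b (l.getD p 0) - pvCnt a (l.getD p 0)))
        + (∑ p ∈ Finset.range i, (pvCnt a (l.getD p 0) - pvCnt b (l.getD p 0))) = 0 := by
      rw [← Finset.sum_add_distrib]
      exact Finset.sum_eq_zero (fun p _ => by ring)
    have merge : (∑ q ∈ Finset.Ico (i+1) j, (pvCnt (l.getD q 0) b - pvCnt (l.getD q 0) a))
        + (∑ p ∈ Finset.Ico (i+1) j, (pvCnt a (l.getD p 0) - pvCnt b (l.getD p 0)))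
        = ∑ k ∈ Finset.Ico (i+1) j, pvE a b (l.getD k 0) := by
      rw [← Finset.sum_add_distrib]
      exact Finset.sum_congr rfl (fun k _ => rfl)
    rw [pvDelta, ← ha, ← hb, ← merge]
    linarith [cancel]
  have expand : pvInv l' - pvInv l = ∑ q ∈ Finset.range n, Row q := by
    rw [pvInv, pvInv, hlen, ← hn, ← Finset.sum_sub_distrib]
    exact Finset.sum_congr rfl (fun q _ => Eq.symm (Finset.sum_sub_distrib _ _))
  rw [key] at expand
  linarith

theorem pv_copy_fold (a : List Int) :
    (PySem.List.pyRange 0 (PySem.List.len a)).foldl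
      (fun nb idx => nb ++ [PySem.List.pyGetD a idx 0]) [] = a := by
  rw [PySem.List.foldl_append_singleton_eq_map]
  simpa using PySem.List.map_pyGetD_pyRange_zero a 0

theorem pv_delta_fold (arr : List Int) (i j : Nat) :
    ((PySem.List.pyRange ((i : Int) + 1) (j : Int)).foldl (fun d k =>
        d + ((if PySem.List.pyGetD arr k 0 < arr.getD j 0 then (1 : Int) else 0)
             - (if PySem.List.pyGetD arr k 0 < arr.getD i 0 then 1 else 0)
             + (if arr.getD i 0 < PySem.List.pyGetD arr k 0 then 1 else 0)
             - (if arr.getD j 0 < PySem.List.pyGetD arr k 0 then 1 else 0)))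
      ((if arr.getD i 0 < arr.getD j 0 then (1 : Int) else 0)
       - (if arr.getD j 0 < arr.getD i 0 then 1 else 0)))
    = pvDelta arr i j := by
  have h1 : ((i : Int) + 1) = ((i + 1 : Nat) : Int) := by push_cast; ring
  rw [h1, PySem.List.pyRange_one, PySem.List.foldl_add, List.map_map, pv_sum_map_range]
  have h2 : (((j : Nat) : Int) - ((i + 1 : Nat) : Int)).toNat = j - (i + 1) := by omega
  rw [h2, pvDelta, Finset.sum_Ico_eq_sum_range]
  have h3 : ∀ t ∈ Finset.range (j - (i + 1)),
      ((fun k => ((if PySem.List.pyGetD arr k 0 < arr.getD j 0 then (1 : Int) else 0)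
             - (if PySem.List.pyGetD arr k 0 < arr.getD i 0 then 1 else 0)
             + (if arr.getD i 0 < PySem.List.pyGetD arr k 0 then 1 else 0)
             - (if arr.getD j 0 < PySem.List.pyGetD arr k 0 then 1 else 0)))
        ∘ (fun k : Nat => ((i + 1 : Nat) : Int) + (k : Int))) t
      = pvE (arr.getD i 0) (arr.getD j 0) (arr.getD (i + 1 + t) 0) := by
    intro t _
    have hc : ((i + 1 : Nat) : Int) + (t : Int) = ((i + 1 + t : Nat) : Int) := by
      push_cast; ring
    simp only [Function.comp_apply, hc, PySem.List.pyGetD_natCast, pvE, pvCnt]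
    ring
  rw [Finset.sum_congr rfl h3]
  simp only [pvCnt]

def pvOut (arr : List Int) : Option (Int × Int) → List Int
  | none => []
  | some (i, j) => pvSwap arr i j

theorem pv_foldl_rel {α σ τ : Type} (R : σ → τ → Prop) (f : σ → α → σ) (g : τ → α → τ)
    (l : List α) (h : ∀ a ∈ l, ∀ s t, R s t → R (f s a) (g t a)) :
    ∀ s t, R s t → R (l.foldl f s) (l.foldl g t) := by
  induction l with
  | nil => intro s t hst; simpa using hst
  | cons x xs ih =>
      intro s t hst
      exact ih (fun a ha s t hst => h a (List.mem_cons_of_mem _ ha) s t hst) _ _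
        (h x List.mem_cons_self s t hst)

theorem pv_main (arr : List Int) :
    returnMinimizedNeighboor arr = returnMinimizedNeighboor_alt arr := by
  unfold returnMinimizedNeighboor returnMinimizedNeighboor_alt
  have hlen : PySem.List.len arr = (arr.length : Int) := by simp [PySem.List.len]
  set R : (Int × List Int × List Int) → (Int × Option (Int × Int)) → Prop :=
    fun s t => s.2.2 = arr ∧ s.1 = arrayCost arr + 2 * t.1 ∧ s.2.1 = pvOut arr t.2 with hR
  have step : ∀ iv ∈ PySem.List.pyRange 0 (PySem.List.len arr), ∀ s t, R s t →
      R ((PySem.List.pyRange (iv + 1) (PySem.List.len arr)).foldl (fun st j =>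
          let cost := st.1; let nbArr := st.2.1; let a := st.2.2
          let a1 := PySem.List.pySetD (PySem.List.pySetD a iv (PySem.List.pyGetD a j 0)) j
                      (PySem.List.pyGetD a iv 0)
          let tempCost := arrayCost a1
          let st2 : Int × List Int :=
            if cost > tempCost then
              (tempCost,
               (PySem.List.pyRange 0 (PySem.List.len a1)).foldl
                 (fun nb idx => nb ++ [PySem.List.pyGetD a1 idx 0]) [])
            else (cost, nbArr)
          let a2 := PySem.List.pySetD (PySem.List.pySetD a1 iv (PySem.List.pyGetD a1 j 0)) j
                      (PySem.List.pyGetD a1 iv 0)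
          (st2.1, st2.2, a2)) s)
        ((PySem.List.pyRange (iv + 1) (PySem.List.len arr)).foldl (fun st j =>
          let b := PySem.List.pyGetD arr j 0
          let d0 := (if PySem.List.pyGetD arr iv 0 < b then (1 : Int) else 0)
                    - (if b < PySem.List.pyGetD arr iv 0 then 1 else 0)
          let d := (PySem.List.pyRange (iv + 1) j).foldl (fun d k =>
            let c := PySem.List.pyGetD arr k 0
            d + ((if c < b then (1 : Int) else 0)
                 - (if c < PySem.List.pyGetD arr iv 0 then 1 else 0)
                 + (if PySem.List.pyGetD arr iv 0 < c then 1 else 0)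
                 - (if b < c then 1 else 0))) d0
          if d < st.1 then (d, some (iv, j)) else st) t) := by
    intro iv hiv s t hst
    refine pv_foldl_rel R _ _ _ ?_ s t hst
    intro jv hjv s t hst
    obtain ⟨hA, hC, hN⟩ := hst
    rw [hlen] at hiv
    have hivb := PySem.List.mem_pyRange_one.mp hiv
    have hjvb := PySem.List.mem_pyRange_one.mp (by rw [hlen] at hjv; exact hjv)
    set iN := iv.toNat with hiN
    set jN := jv.toNat with hjN
    have hiv' : iv = (iN : Int) := by omega
    have hjv' : jv = (jN : Int) := by omega
    have hij : iN < jN := by omega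
    have hjlt : jN < arr.length := by omega
    -- the swapped array
    have ha1 : PySem.List.pySetD (PySem.List.pySetD s.2.2 iv (PySem.List.pyGetD s.2.2 jv 0)) jv
        (PySem.List.pyGetD s.2.2 iv 0) = pvSwap arr (iN : Int) (jN : Int) := by
      rw [hA, hiv', hjv']; rfl
    -- A's recomputed cost
    have htc : arrayCost (pvSwap arr (iN : Int) (jN : Int))
        = arrayCost arr + 2 * pvDelta arr iN jN := by
      rw [pv_arrayCost_eq, pv_inv_swap arr iN jN hij hjlt, pv_arrayCost_eq]
      ring
    -- B's delta
    have hd : ((PySem.List.pyRange (iv + 1) jv).foldl (fun d k =>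
          d + ((if PySem.List.pyGetD arr k 0 < PySem.List.pyGetD arr jv 0 then (1 : Int) else 0)
               - (if PySem.List.pyGetD arr k 0 < PySem.List.pyGetD arr iv 0 then 1 else 0)
               + (if PySem.List.pyGetD arr iv 0 < PySem.List.pyGetD arr k 0 then 1 else 0)
               - (if PySem.List.pyGetD arr jv 0 < PySem.List.pyGetD arr k 0 then 1 else 0)))
        ((if PySem.List.pyGetD arr iv 0 < PySem.List.pyGetD arr jv 0 then (1 : Int) else 0)
         - (if PySem.List.pyGetD arr jv 0 < PySem.List.pyGetD arr iv 0 then 1 else 0)))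
        = pvDelta arr iN jN := by
      rw [hiv', hjv', PySem.List.pyGetD_natCast, PySem.List.pyGetD_natCast]
      exact pv_delta_fold arr iN jN
    -- restore
    have hrest : ∀ a1, a1 = pvSwap arr (iN : Int) (jN : Int) →
        PySem.List.pySetD (PySem.List.pySetD a1 iv (PySem.List.pyGetD a1 jv 0)) jv
          (PySem.List.pyGetD a1 iv 0) = arr := by
      intro a1 h1
      rw [h1, hiv', hjv']
      exact pv_swap_swap arr iN jN hij hjlt
    simp only []
    rw [ha1, hd, htc, hC]
    by_cases hcond : pvDelta arr iN jN < t.1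
    · rw [if_pos (by linarith), if_pos hcond]
      refine ⟨hrest _ rfl, by simp, ?_⟩
      simp only [pv_copy_fold]
      rw [hiv', hjv']
      rfl
    · rw [if_neg (by omega), if_neg hcond]
      exact ⟨hrest _ rfl, rfl, hN⟩
  have hrel := pv_foldl_rel R _ _ (PySem.List.pyRange 0 (PySem.List.len arr)) step
    (arrayCost arr, ([] : List Int), arr) ((0 : Int), (none : Option (Int × Int)))
    ⟨rfl, by ring, rfl⟩
  obtain ⟨-, -, h3⟩ := hrel
  rw [h3]
  rcases hfb : ((PySem.List.pyRange 0 (PySem.List.len arr)).foldl _ ((0 : Int), (none : Option (Int × Int)))).2 with _ | ⟨i, j⟩ <;>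
    simp only [hfb, pvOut, pvSwap]

-- ===== VERDICT (by name: the statement is the Claim_ definition above) =====
theorem returnMinimizedNeighboor_spec : Claim_equal_returnMinimizedNeighboor := by
  intro arr _
  unfold Spec_returnMinimizedNeighboor
  exact pv_main arr
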